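-- pv_equiv track=rewrite | github.com/anna-hope/talaffoz | talaffoz.py | bucket_data
-- ===== SOURCE A (Python) =====
-- from itertools import zip_longest, chain
-- from typing import Dict, List
--
-- def bucket_data(pronunciations: Dict[str, List[str]]):
--     buckets = [(10, 10), (15, 15), (20, 20), (35, 35)]
--     data_buckets = [[] for _ in range(len(buckets))]
--
--     end_char = '#'
--
--     for word, pronunciation in pronunciations.items():
--         for n, (bucket_word, bucket_pron) in enumerate(buckets):
--             if len(word) <= bucket_word and len(pronunciation) <= bucket_pron:
--                 word = [c for c, _ in zip_longest(word, range(bucket_word),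
--                                                   fillvalue=end_char)]
--                 pronunciation = [s for s, _ in zip_longest(pronunciation,
--                                                            range(bucket_pron),
--                                                            fillvalue=end_char)]
--                 data_buckets[n].append((word, pronunciation))
--                 break
--
--     return buckets, data_buckets
-- ===== SOURCE B (Python) =====
-- def bucket_data(pronunciations):
--     sizes = [10, 15, 20, 35]
--     data_buckets = [[] for _ in sizes]
--     for word, pron in pronunciations.items():
--         m = max(len(word), len(pron))
--         # binary search: first index with sizes[i] >= m (bisect_left by hand)
--         lo, hi = 0, len(sizes)
--         while lo < hi:
--             mid = (lo + hi) // 2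
--             if sizes[mid] < m:
--                 lo = mid + 1
--             else:
--                 hi = mid
--         if lo < len(sizes):
--             size = sizes[lo]
--             data_buckets[lo].append(
--                 (list(word) + ['#'] * (size - len(word)),
--                  list(pron) + ['#'] * (size - len(pron))))
--     return [(s, s) for s in sizes], data_buckets
-- ===== Notes on version B (the rewrite author's own statement) =====
-- stated objective: alternative
-- what changed: Replaces the first-fitting linear scan over the four (word,pron) bucket pairs and the zip_longest padding by one max() of the two lengths, a hand-written bisect_left binary search for the target bucket size, and arithmetic padding with list + ['#']*(size-len).
import Mathlib
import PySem

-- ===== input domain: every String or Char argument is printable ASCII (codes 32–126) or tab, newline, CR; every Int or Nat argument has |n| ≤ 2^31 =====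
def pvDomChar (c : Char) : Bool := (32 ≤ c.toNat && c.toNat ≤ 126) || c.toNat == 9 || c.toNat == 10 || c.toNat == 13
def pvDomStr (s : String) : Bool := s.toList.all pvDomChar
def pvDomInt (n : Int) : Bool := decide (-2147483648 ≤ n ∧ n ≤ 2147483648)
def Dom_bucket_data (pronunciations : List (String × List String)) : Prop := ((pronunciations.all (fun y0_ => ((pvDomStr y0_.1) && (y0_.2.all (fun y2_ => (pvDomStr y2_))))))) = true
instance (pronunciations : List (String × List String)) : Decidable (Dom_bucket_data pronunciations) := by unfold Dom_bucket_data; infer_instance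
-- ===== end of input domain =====

-- B replaces A's first-fitting linear scan over the four bucket pairs (and its zip_longest padding)
-- by max(len,len) + a hand-written bisect_left binary search + arithmetic '#'-padding (alternative, same cost).

-- ===== PORT A =====
-- [c for c, _ in zip_longest(xs, range(n), fillvalue='#')] : exact for every xs and n
def pvPadZip (xs : List String) (n : Nat) : List String :=
  match xs, n with
  | [], 0 => []
  | [], Nat.succ k => "#" :: pvPadZip [] k
  | x :: t, 0 => x :: pvPadZip t 0
  | x :: t, Nat.succ k => x :: pvPadZip t k

-- the inner 'for n, (bucket_word, bucket_pron) in enumerate(buckets): … break' loop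
def pvInnerA (word pron : List String) :
    List (Int × (Int × Int)) → Option (Int × (List String × List String))
  | [] => none
  | (n, (bw, bp)) :: rest =>
    if (word.length : Int) ≤ bw ∧ (pron.length : Int) ≤ bp then
      some (n, (pvPadZip word bw.toNat, pvPadZip pron bp.toNat))
    else pvInnerA word pron rest

def bucket_data (pronunciations : List (String × List String)) : (List (Int × Int)) × (List (List (List String × List String))) :=
  let buckets : List (Int × Int) := [(10, 10), (15, 15), (20, 20), (35, 35)]
  let data_buckets : List (List (List String × List String)) :=
    (List.range buckets.length).map (fun _ => [])
  let db := pronunciations.foldl (fun db wp =>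
    let wcs := wp.1.toList.map (fun c => String.ofList [c])
    match pvInnerA wcs wp.2 (PySem.List.enumerate buckets) with
    | none => db
    | some (n, pair) => db.modify n.toNat (fun b => b ++ [pair])) data_buckets
  (buckets, db)

-- ===== PORT B =====
-- the hand-written bisect_left while-loop of Source B
def pvBisect (sizes : List Int) (m : Int) (lo hi : Nat) : Nat :=
  if _h : lo < hi then
    let mid := (lo + hi) / 2
    if sizes.getD mid 0 < m then pvBisect sizes m (mid + 1) hi
    else pvBisect sizes m lo mid
  else lo
termination_by hi - lo
decreasing_by all_goals omega

def bucket_data_alt (pronunciations : List (String × List String)) : (List (Int × Int)) × (List (List (List String × List String))) :=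
  let sizes : List Int := [10, 15, 20, 35]
  let data_buckets : List (List (List String × List String)) := sizes.map (fun _ => [])
  let db := pronunciations.foldl (fun db wp =>
    let wcs := wp.1.toList.map (fun c => String.ofList [c])
    let m : Int := max (wcs.length : Int) (wp.2.length : Int)
    let lo := pvBisect sizes m 0 sizes.length
    if lo < sizes.length then
      let size := sizes.getD lo 0
      db.modify lo (fun b => b ++
        [(wcs ++ List.replicate (size - (wcs.length : Int)).toNat "#",
          wp.2 ++ List.replicate (size - (wp.2.length : Int)).toNat "#")])
    else db) data_buckets
  (sizes.map (fun s => (s, s)), db)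

-- ===== PRECONDITION & SPEC =====
def Spec_bucket_data (pronunciations : List (String × List String)) (out : (List (Int × Int)) × (List (List (List String × List String)))) : Prop := out = bucket_data_alt pronunciations
instance (pronunciations : List (String × List String)) (out : (List (Int × Int)) × (List (List (List String × List String)))) : Decidable (Spec_bucket_data pronunciations out) := by unfold Spec_bucket_data; infer_instance

-- ===== CLAIM (what is proved, stated in full; the proofs are below) =====
def Claim_equal_bucket_data : Prop := ∀ (pronunciations : List (String × List String)), Dom_bucket_data pronunciations → Spec_bucket_data pronunciations (bucket_data pronunciations)

-- ===== LEMMAS AND PROOFS =====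

theorem pvPadZip_eq_append (xs : List String) (n : Nat) (h : xs.length ≤ n) :
    pvPadZip xs n = xs ++ List.replicate (n - xs.length) "#" := by
  induction xs generalizing n with
  | nil =>
    induction n with
    | zero => simp [pvPadZip]
    | succ k ih => simp [pvPadZip, List.replicate_succ] at ih ⊢; exact ih
  | cons x t ih =>
    cases n with
    | zero => simp at h
    | succ k =>
      simp only [pvPadZip, List.cons_append]
      rw [ih k (by simpa using h)]
      simp

theorem pvBisect_lt (s : List Int) (m : Int) (lo hi : Nat) (h : lo < hi) :
    pvBisect s m lo hi =
      if s.getD ((lo + hi) / 2) 0 < m then pvBisect s m ((lo + hi) / 2 + 1) hi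
      else pvBisect s m lo ((lo + hi) / 2) := by
  rw [pvBisect]; simp [h]

theorem pvBisect_ge (s : List Int) (m : Int) (lo hi : Nat) (h : ¬ lo < hi) :
    pvBisect s m lo hi = lo := by
  rw [pvBisect]; simp [h]

theorem pvBisect_char (m : Int) :
    pvBisect [10, 15, 20, 35] m 0 4 =
      if m ≤ 10 then 0 else if m ≤ 15 then 1 else if m ≤ 20 then 2
      else if m ≤ 35 then 3 else 4 := by
  rw [pvBisect_lt _ _ _ _ (by norm_num)]
  norm_num
  by_cases h3 : (20 : Int) < m
  · rw [if_pos h3, pvBisect_lt _ _ _ _ (by norm_num)]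
    norm_num
    by_cases h4 : (35 : Int) < m
    · rw [if_pos h4, pvBisect_ge _ _ _ _ (by norm_num)]
      rw [if_neg (by omega), if_neg (by omega), if_neg (by omega), if_neg (by omega)]
    · rw [if_neg h4, pvBisect_ge _ _ _ _ (by norm_num)]
      rw [if_neg (by omega), if_neg (by omega), if_neg (by omega), if_pos (by omega)]
  · rw [if_neg h3, pvBisect_lt _ _ _ _ (by norm_num)]
    norm_num
    by_cases h2 : (15 : Int) < m
    · rw [if_pos h2, pvBisect_ge _ _ _ _ (by norm_num)]
      rw [if_neg (by omega), if_neg (by omega), if_pos (by omega)]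
    · rw [if_neg h2, pvBisect_lt _ _ _ _ (by norm_num)]
      norm_num
      by_cases h1 : (10 : Int) < m
      · rw [if_pos h1, pvBisect_ge _ _ _ _ (by norm_num)]
        rw [if_neg (by omega), if_pos (by omega)]
      · rw [if_neg h1, pvBisect_ge _ _ _ _ (by norm_num)]
        rw [if_pos (by omega)]

-- the matched entry (bucket index and padded pair) agree for one (word, pron) item
theorem item_eq (db : List (List (List String × List String))) (w pron : List String) :
    (match pvInnerA w pron (PySem.List.enumerate [((10 : Int), (10 : Int)), (15, 15), (20, 20), (35, 35)]) with
     | none => db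
     | some (n, pair) => db.modify n.toNat (fun b => b ++ [pair])) =
    (if pvBisect [10, 15, 20, 35] (max (w.length : Int) (pron.length : Int)) 0 4 < 4 then
       db.modify (pvBisect [10, 15, 20, 35] (max (w.length : Int) (pron.length : Int)) 0 4) (fun b => b ++
         [(w ++ List.replicate ((([10, 15, 20, 35] : List Int).getD (pvBisect [10, 15, 20, 35] (max (w.length : Int) (pron.length : Int)) 0 4) 0) - (w.length : Int)).toNat "#",
           pron ++ List.replicate ((([10, 15, 20, 35] : List Int).getD (pvBisect [10, 15, 20, 35] (max (w.length : Int) (pron.length : Int)) 0 4) 0) - (pron.length : Int)).toNat "#")])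
     else db) := by
  rw [pvBisect_char]
  simp only [PySem.List.enumerate]
  simp only [pvInnerA]
  by_cases h1 : max (w.length : Int) (pron.length : Int) ≤ 10
  · rw [if_pos (show (w.length : Int) ≤ 10 ∧ (pron.length : Int) ≤ 10 by omega),
      if_pos h1, if_pos (by norm_num)]
    rw [pvPadZip_eq_append _ _ (by omega), pvPadZip_eq_append _ _ (by omega)]
    norm_num
  · rw [if_neg (by omega)]
    by_cases h2 : max (w.length : Int) (pron.length : Int) ≤ 15
    · rw [if_pos (show (w.length : Int) ≤ 15 ∧ (pron.length : Int) ≤ 15 by omega),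
        if_neg h1, if_pos h2, if_pos (by norm_num)]
      rw [pvPadZip_eq_append _ _ (by omega), pvPadZip_eq_append _ _ (by omega)]
      norm_num
    · rw [if_neg (by omega)]
      by_cases h3 : max (w.length : Int) (pron.length : Int) ≤ 20
      · rw [if_pos (show (w.length : Int) ≤ 20 ∧ (pron.length : Int) ≤ 20 by omega),
          if_neg h1, if_neg h2, if_pos h3, if_pos (by norm_num)]
        rw [pvPadZip_eq_append _ _ (by omega), pvPadZip_eq_append _ _ (by omega)]
        norm_num; rfl
      · rw [if_neg (by omega)]
        by_cases h4 : max (w.length : Int) (pron.length : Int) ≤ 35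
        · rw [if_pos (show (w.length : Int) ≤ 35 ∧ (pron.length : Int) ≤ 35 by omega),
            if_neg h1, if_neg h2, if_neg h3, if_pos h4, if_pos (by norm_num)]
          rw [pvPadZip_eq_append _ _ (by omega), pvPadZip_eq_append _ _ (by omega)]
          norm_num; rfl
        · rw [if_neg (by omega), if_neg h1, if_neg h2, if_neg h3, if_neg h4,
            if_neg (by norm_num)]

theorem bucket_data_spec : Claim_equal_bucket_data := by
  intro p _
  unfold Spec_bucket_data bucket_data bucket_data_alt
  simp only [List.map_cons, List.map_nil, List.length_cons, List.length_nil]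
  congr 1
  refine List.foldl_ext _ _ _ (fun db wp _ => ?_)
  exact item_eq db (wp.1.toList.map (fun c => String.ofList [c])) wp.2
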